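-- pv_equiv track=rewrite | github.com/datahub-project/datahub | metadata-ingestion/src/datahub/api/entities/dataset/dataset.py | _simplify_field_path
-- ===== SOURCE A (Python) =====
-- def _simplify_field_path(field_path: str) -> str:
--     # field paths with [type=array] or [type=map] or [type=union] should never be simplified
--     for type in ["array", "map", "union"]:
--         if f"[type={type}]" in field_path:
--             return field_path
--     if field_path.startswith("[version=2.0]"):
--         # v2 field path
--         field_components = []
--         current_field = ""
--         for c in field_path:
--             if c == "[":
--                 if current_field:
--                     field_components.append(current_field)
--                 current_field = ""
--                 omit_next = True
--             elif c == "]":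
--                 omit_next = False
--             elif c == ".":
--                 pass
--             elif not omit_next:
--                 current_field += c
--         if current_field:
--             field_components.append(current_field)
--         return ".".join(field_components)
--     else:
--         return field_path
-- ===== SOURCE B (Python) =====
-- def _simplify_field_path(field_path: str) -> str:
--     for type in ["array", "map", "union"]:
--         if f"[type={type}]" in field_path:
--             return field_path
--     if not field_path.startswith("[version=2.0]"):
--         return field_path
--     # v2: each '[...]' bracket group separates components; keep the text after
--     # each group's closing ']', with '.' and stray ']' characters removed
--     parts = []
--     for chunk in field_path.split("[")[1:]:
--         i = chunk.find("]")
--         if i != -1: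
--             tail = chunk[i + 1:].replace("]", "").replace(".", "")
--             if tail:
--                 parts.append(tail)
--     return ".".join(parts)
-- ===== Notes on version B (the rewrite author's own statement) =====
-- stated objective: idiomatic
-- what changed: Replaces the char-by-char omit_next state machine with splitting the path on '[' and, for each chunk, taking the text after its closing ']' with str.replace stripping dots and stray brackets.
import Mathlib
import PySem

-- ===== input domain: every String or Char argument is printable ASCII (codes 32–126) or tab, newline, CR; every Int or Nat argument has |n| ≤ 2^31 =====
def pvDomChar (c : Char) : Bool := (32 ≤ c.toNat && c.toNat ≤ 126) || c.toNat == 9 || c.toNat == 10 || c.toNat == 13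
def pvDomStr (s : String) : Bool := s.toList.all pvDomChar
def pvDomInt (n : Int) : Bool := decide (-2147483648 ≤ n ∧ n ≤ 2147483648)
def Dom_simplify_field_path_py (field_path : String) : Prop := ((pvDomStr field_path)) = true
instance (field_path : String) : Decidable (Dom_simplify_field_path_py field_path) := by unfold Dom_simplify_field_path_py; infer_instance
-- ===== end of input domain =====

-- B simplifies the v2 field path by splitting on '[' instead of A's char-by-char
-- omit_next state machine (objective: idiomatic; same return value everywhere).

-- ===== PORT A =====
-- one step of A's for-loop; state = (field_components, current_field, omit_next)
def pvAStep (st : List (List Char) × List Char × Bool) (c : Char) :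
    List (List Char) × List Char × Bool :=
  if c = '[' then ((if st.2.1 ≠ [] then st.1 ++ [st.2.1] else st.1), [], true)
  else if c = ']' then (st.1, st.2.1, false)
  else if c = '.' then st
  else if st.2.2 then st
  else (st.1, st.2.1 ++ [c], st.2.2)

def simplify_field_path_py (field_path : String) : String :=
  -- for type in ["array","map","union"]: if f"[type={type}]" in field_path: return field_path
  if ["array", "map", "union"].any
      (fun t => PySem.Chars.isIn ("[type=" ++ t ++ "]").toList field_path.toList) then
    field_path
  else if PySem.Chars.startswith field_path.toList "[version=2.0]".toList then
    -- Python's omit_next is first assigned at the first character, which the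
    -- startswith guard makes a '['; the initial value below is never read
    let st := field_path.toList.foldl pvAStep ([], [], true)
    let comps := if st.2.1 ≠ [] then st.1 ++ [st.2.1] else st.1
    String.mk (PySem.Chars.join ['.'] comps)
  else field_path

-- ===== PORT B =====
-- body of Source B's for-loop over the '['-chunks
def pvBChunk (parts : List (List Char)) (chunk : List Char) : List (List Char) :=
  let i := PySem.Chars.find chunk [']']
  if i ≠ -1 then
    let tail := PySem.Chars.replace
      (PySem.Chars.replace (PySem.Chars.slice chunk (some (i + 1)) none) [']'] []) ['.'] []
    if tail ≠ [] then parts ++ [tail] else parts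
  else parts

def simplify_field_path_py_alt (field_path : String) : String :=
  if ["array", "map", "union"].any
      (fun t => PySem.Chars.isIn ("[type=" ++ t ++ "]").toList field_path.toList) then
    field_path
  else if !(PySem.Chars.startswith field_path.toList "[version=2.0]".toList) then
    field_path
  else
    -- field_path.split("[")[1:]
    let chunks := PySem.List.slice (PySem.Chars.splitOn field_path.toList ['[']) (some 1) none
    String.mk (PySem.Chars.join ['.'] (chunks.foldl pvBChunk []))

-- ===== PRECONDITION & SPEC =====
def Spec_simplify_field_path_py (field_path : String) (out : String) : Prop := out = simplify_field_path_py_alt field_path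
instance (field_path : String) (out : String) : Decidable (Spec_simplify_field_path_py field_path out) := by unfold Spec_simplify_field_path_py; infer_instance

-- ===== CLAIM (what is proved, stated in full; the proofs are below) =====
def Claim_equal_simplify_field_path_py : Prop := ∀ (field_path : String), Dom_simplify_field_path_py field_path → Spec_simplify_field_path_py field_path (simplify_field_path_py field_path)

-- ===== LEMMAS AND PROOFS =====

-- the chars of an inter-bracket region that survive A's loop: '.' and ']' dropped
def pvClean (l : List Char) : List Char := l.filter (fun c => !(c = ']' || c = '.'))

-- the suffix after the first ']' of a chunk, if any
def pvAfter : List Char → Option (List Char)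
  | [] => none
  | c :: t => if c = ']' then some t else pvAfter t

-- the components one '['-chunk contributes
def pvProc (chunk : List Char) : List (List Char) :=
  match pvAfter chunk with
  | some b => if pvClean b ≠ [] then [pvClean b] else []
  | none => []

-- split on '[': (text before the first '[', list of chunks after each '[')
def pvSplit : List Char → List Char × List (List Char)
  | [] => ([], [])
  | c :: t =>
      let p := pvSplit t
      if c = '[' then ([], p.1 :: p.2) else (c :: p.1, p.2)

-- A's final flush
def pvFinish (st : List (List Char) × List Char × Bool) : List (List Char) :=
  if st.2.1 ≠ [] then st.1 ++ [st.2.1] else st.1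

theorem pvAfter_some (chunk b : List Char) (h : pvAfter chunk = some b) :
    ∃ a, chunk = a ++ ']' :: b ∧ ']' ∉ a := by
  induction chunk with
  | nil => simp [pvAfter] at h
  | cons c t ih =>
      by_cases hc : c = ']'
      · subst hc
        simp [pvAfter] at h
        exact ⟨[], by simp [h], by simp⟩
      · rw [show pvAfter (c :: t) = pvAfter t from by simp [pvAfter, hc]] at h
        obtain ⟨a, rfl, ha⟩ := ih h
        refine ⟨c :: a, by simp, ?_⟩
        simp only [List.mem_cons, not_or]
        exact ⟨fun h' => hc h'.symm, ha⟩

theorem pvAfter_none (chunk : List Char) (h : pvAfter chunk = none) : ']' ∉ chunk := by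
  induction chunk with
  | nil => simp
  | cons c t ih =>
      by_cases hc : c = ']'
      · subst hc; simp [pvAfter] at h
      · rw [show pvAfter (c :: t) = pvAfter t from by simp [pvAfter, hc]] at h
        simp only [List.mem_cons, not_or]
        exact ⟨fun h' => hc h'.symm, ih h⟩

theorem pv_find_go (a b : List Char) (ha : ']' ∉ a) (k : Nat) :
    PySem.Chars.find.go [']'] (a ++ ']' :: b) k = (k : Int) + a.length := by
  induction a generalizing k with
  | nil => simp [PySem.Chars.find.go, List.isPrefixOf]
  | cons c t ih =>
      simp only [List.mem_cons, not_or] at ha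
      simp only [List.cons_append, PySem.Chars.find.go, List.isPrefixOf]
      rw [if_neg (by simp [ha.1])]
      rw [ih ha.2]
      simp only [List.length_cons]; push_cast; ring

theorem pv_replace_go (c : Char) (fuel : Nat) (l acc : List Char) (h : l.length ≤ fuel) :
    PySem.Chars.replace.go [c] [] fuel l acc =
      acc.reverse ++ l.filter (fun x => !(x = c)) := by
  induction fuel generalizing l acc with
  | zero =>
      have : l = [] := List.eq_nil_of_length_eq_zero (Nat.le_zero.mp h)
      subst this; simp [PySem.Chars.replace.go]
  | succ n ih =>
      cases l with
      | nil => simp [PySem.Chars.replace.go]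
      | cons x t =>
          simp only [PySem.Chars.replace.go, List.isPrefixOf]
          by_cases hx : x = c
          · subst hx
            rw [if_pos (by simp)]
            rw [show List.drop [x].length (x :: t) = t from by simp,
               show (([] : List Char).reverse ++ acc) = acc from by simp]
            simp only [List.length_cons] at h
            rw [ih t acc (by omega)]
            simp
          · rw [if_neg (by simp [Ne.symm hx])]
            simp only [List.length_cons] at h
            rw [ih t (x :: acc) (by omega)]
            simp [hx]

theorem pv_replace_single (c : Char) (l : List Char) :
    PySem.Chars.replace l [c] [] = l.filter (fun x => !(x = c)) := by
  simp only [PySem.Chars.replace, List.isEmpty_cons]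
  exact pv_replace_go c l.length l [] le_rfl

theorem pv_splitOn_go (fuel : Nat) (l cur : List Char) (acc : List (List Char))
    (h : l.length ≤ fuel) :
    PySem.Chars.splitOn.go ['['] fuel l cur acc =
      acc.reverse ++ (cur.reverse ++ (pvSplit l).1) :: (pvSplit l).2 := by
  induction fuel generalizing l cur acc with
  | zero =>
      have : l = [] := List.eq_nil_of_length_eq_zero (Nat.le_zero.mp h)
      subst this; simp [PySem.Chars.splitOn.go, pvSplit]
  | succ n ih =>
      cases l with
      | nil => simp [PySem.Chars.splitOn.go, pvSplit]
      | cons x t =>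
          simp only [PySem.Chars.splitOn.go, List.isPrefixOf]
          by_cases hx : x = '['
          · subst hx
            rw [if_pos (by simp)]
            rw [show List.drop (['['] : List Char).length ('[' :: t) = t from by simp]
            simp only [List.length_cons] at h
            rw [ih t [] (cur.reverse :: acc) (by omega)]
            simp [pvSplit]
          · rw [if_neg (by simp [Ne.symm hx])]
            simp only [List.length_cons] at h
            rw [ih t (x :: cur) acc (by omega)]
            simp [pvSplit, hx]

theorem pv_splitOn (l : List Char) :
    PySem.Chars.splitOn l ['['] = (pvSplit l).1 :: (pvSplit l).2 := by
  simpa using pv_splitOn_go (l.length + 1) l [] [] (by omega)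

-- Source B's chunk body produces exactly pvProc chunk
theorem pvBChunk_eq (parts : List (List Char)) (chunk : List Char) :
    pvBChunk parts chunk = parts ++ pvProc chunk := by
  unfold pvBChunk pvProc
  cases hA : pvAfter chunk with
  | none =>
      have hmem := pvAfter_none chunk hA
      have : PySem.Chars.find chunk [']'] = -1 :=
        (PySem.Chars.find_eq_neg_one_iff _ _).mpr
          (by rw [List.singleton_infix_iff]; exact hmem)
      simp [this]
  | some b =>
      obtain ⟨a, rfl, ha⟩ := pvAfter_some chunk b hA
      have hfind : PySem.Chars.find (a ++ ']' :: b) [']'] = (a.length : Int) := by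
        simpa using pv_find_go a b ha 0
      rw [hfind]
      rw [if_pos (by omega)]
      have hslice : PySem.Chars.slice (a ++ ']' :: b) (some ((a.length : Int) + 1)) none = b := by
        rw [PySem.Chars.slice_eq_listSlice, PySem.List.slice_from _ (by positivity)]
        rw [show a ++ ']' :: b = (a ++ [']']) ++ b from by simp]
        rw [show ((a.length : Int) + 1).toNat = (a ++ [']']).length from by simp]
        exact List.drop_left
      rw [hslice, pv_replace_single, pv_replace_single]
      have hclean : (b.filter (fun x => !(x = ']'))).filter (fun x => !(x = '.')) = pvClean b := by
        rw [List.filter_filter]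
        unfold pvClean
        congr 1
        funext x
        by_cases h1 : x = ']' <;> by_cases h2 : x = '.' <;> simp [h1, h2]
      rw [hclean]
      by_cases h : pvClean b = [] <;> simp [h]

-- joint invariant of A's loop: in the omit state (current_field empty) the rest of
-- the input contributes the components of all remaining chunks; in the keep state
-- the rest of the current chunk extends current_field
theorem pvA_loop (cs : List Char) :
    (∀ comps, pvFinish (cs.foldl pvAStep (comps, [], true)) =
        comps ++ ((pvSplit cs).1 :: (pvSplit cs).2).flatMap pvProc) ∧
    (∀ comps cur, pvFinish (cs.foldl pvAStep (comps, cur, false)) =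
        comps ++ (if cur ++ pvClean (pvSplit cs).1 ≠ [] then [cur ++ pvClean (pvSplit cs).1] else [])
          ++ ((pvSplit cs).2).flatMap pvProc) := by
  induction cs with
  | nil =>
      constructor
      · intro comps; simp [pvFinish, pvSplit, pvProc, pvAfter]
      · intro comps cur
        simp only [List.foldl_nil, pvFinish, pvSplit, pvClean, List.filter_nil,
          List.append_nil, List.flatMap_nil]
        by_cases hc : cur = [] <;> simp [hc]
  | cons c t ih =>
      obtain ⟨ihS, ihK⟩ := ih
      constructor
      · intro comps
        rcases eq_or_ne c '[' with rfl | h1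
        · rw [List.foldl_cons,
            show pvAStep (comps, [], true) '[' = (comps, [], true) from by simp [pvAStep],
            ihS comps]
          simp [pvSplit, pvProc, pvAfter]
        · rcases eq_or_ne c ']' with rfl | h2
          · rw [List.foldl_cons,
              show pvAStep (comps, [], true) ']' = (comps, [], false) from by simp [pvAStep],
              ihK comps []]
            rw [show (pvSplit (']' :: t)).1 = ']' :: (pvSplit t).1 from by simp [pvSplit],
              show (pvSplit (']' :: t)).2 = (pvSplit t).2 from by simp [pvSplit]]
            simp [pvProc, pvAfter]
          · rw [List.foldl_cons,
              show pvAStep (comps, [], true) c = (comps, [], true) from by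
                simp [pvAStep, h1, h2],
              ihS comps]
            rw [show (pvSplit (c :: t)).1 = c :: (pvSplit t).1 from by simp [pvSplit, h1],
              show (pvSplit (c :: t)).2 = (pvSplit t).2 from by simp [pvSplit, h1]]
            simp only [List.flatMap_cons]
            rw [show pvProc (c :: (pvSplit t).1) = pvProc (pvSplit t).1 from by
              unfold pvProc
              rw [show pvAfter (c :: (pvSplit t).1) = pvAfter (pvSplit t).1 from by
                simp [pvAfter, h2]]]
      · intro comps cur
        rcases eq_or_ne c '[' with rfl | h1
        · rw [List.foldl_cons,
            show pvAStep (comps, cur, false) '[' =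
              ((if cur ≠ [] then comps ++ [cur] else comps), [], true) from by simp [pvAStep],
            ihS _]
          rw [show (pvSplit ('[' :: t)).1 = [] from by simp [pvSplit],
            show (pvSplit ('[' :: t)).2 = (pvSplit t).1 :: (pvSplit t).2 from by simp [pvSplit]]
          by_cases hc : cur = [] <;> simp [hc, pvClean]
        · rcases eq_or_ne c ']' with rfl | h2
          · rw [List.foldl_cons,
              show pvAStep (comps, cur, false) ']' = (comps, cur, false) from by simp [pvAStep],
              ihK comps cur]
            rw [show (pvSplit (']' :: t)).1 = ']' :: (pvSplit t).1 from by simp [pvSplit],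
              show (pvSplit (']' :: t)).2 = (pvSplit t).2 from by simp [pvSplit]]
            rw [show pvClean (']' :: (pvSplit t).1) = pvClean (pvSplit t).1 from by
              simp [pvClean]]
          · rcases eq_or_ne c '.' with rfl | h3
            · rw [List.foldl_cons,
                show pvAStep (comps, cur, false) '.' = (comps, cur, false) from by
                  simp [pvAStep],
                ihK comps cur]
              rw [show (pvSplit ('.' :: t)).1 = '.' :: (pvSplit t).1 from by simp [pvSplit],
                show (pvSplit ('.' :: t)).2 = (pvSplit t).2 from by simp [pvSplit]]
              rw [show pvClean ('.' :: (pvSplit t).1) = pvClean (pvSplit t).1 from by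
                simp [pvClean]]
            · rw [List.foldl_cons,
                show pvAStep (comps, cur, false) c = (comps, cur ++ [c], false) from by
                  simp [pvAStep, h1, h2, h3],
                ihK comps (cur ++ [c])]
              rw [show (pvSplit (c :: t)).1 = c :: (pvSplit t).1 from by simp [pvSplit, h1],
                show (pvSplit (c :: t)).2 = (pvSplit t).2 from by simp [pvSplit, h1]]
              rw [show pvClean (c :: (pvSplit t).1) = c :: pvClean (pvSplit t).1 from by
                simp [pvClean, h2, h3]]
              simp

-- ===== VERDICT (by name: the statement is the Claim_ definition above) =====
theorem simplify_field_path_py_spec : Claim_equal_simplify_field_path_py := by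
  intro field_path _
  unfold Spec_simplify_field_path_py simplify_field_path_py simplify_field_path_py_alt
  by_cases hg : (["array", "map", "union"].any
      (fun t => PySem.Chars.isIn ("[type=" ++ t ++ "]").toList field_path.toList)) = true
  · rw [if_pos hg, if_pos hg]
  · rw [if_neg hg, if_neg hg]
    by_cases hs : PySem.Chars.startswith field_path.toList "[version=2.0]".toList = true
    · rw [if_pos hs, if_neg (by rw [hs]; decide)]
      -- the string starts with '['
      have hpre : "[version=2.0]".toList <+: field_path.toList := by
        rw [PySem.Chars.startswith] at hs
        exact List.isPrefixOf_iff_prefix.mp hs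
      obtain ⟨rest, hrest⟩ := hpre
      have hcs : field_path.toList = '[' :: ("version=2.0]".toList ++ rest) := by
        rw [← hrest]; rfl
      show String.mk (PySem.Chars.join ['.']
          (pvFinish (List.foldl pvAStep ([], [], true) field_path.toList))) =
        String.mk (PySem.Chars.join ['.'] (List.foldl pvBChunk []
          (PySem.List.slice (PySem.Chars.splitOn field_path.toList ['[']) (some 1) none)))
      -- A side
      rw [(pvA_loop field_path.toList).1 []]
      -- B side
      rw [pv_splitOn, PySem.List.slice_from _ (by norm_num)]
      rw [show ((1 : Int)).toNat = 1 from rfl, List.drop_one, List.tail_cons]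
      have hfold : ∀ (chunks : List (List Char)) (init : List (List Char)),
          List.foldl pvBChunk init chunks = init ++ chunks.flatMap pvProc := by
        intro chunks
        induction chunks with
        | nil => intro init; simp
        | cons ch r ih => intro init; simp only [List.foldl_cons, pvBChunk_eq, ih,
            List.flatMap_cons, List.append_assoc]
      rw [hfold _ []]
      -- first chunk is empty since the string starts with '['
      have hfst : (pvSplit field_path.toList).1 = [] := by
        rw [hcs]; simp [pvSplit]
      rw [List.flatMap_cons, hfst]
      simp [pvProc, pvAfter]
    · rw [if_neg hs, if_pos (by simp only [Bool.not_eq_true] at hs; rw [hs]; decide)]
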